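-- pv_equiv track=rewrite | github.com/liaowenwu/source-link | qcpj-crawler/scripts/online_order_save_debug_tool.py | pick_live_item
-- ===== SOURCE A (Python) =====
-- from typing import Any, Dict, Iterable, List, Optional, Sequence, Tuple
--
-- def text_value(value: Any) -> str:
--     return "" if value is None else str(value).strip()
--
-- def first_present_value(*values: Any) -> Any:
--     for value in values:
--         if value is None:
--             continue
--         if isinstance(value, str) and not value.strip():
--             continue
--         return value
--     return None
--
-- def normalize_match_key(value: Any) -> str:
--     return "".join(ch for ch in text_value(value).upper() if ch.isalnum())
--
-- def score_live_item_match(row: Dict[str, Any], live_item: Dict[str, Any]) -> int: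
--     score = 0
--     if text_value(row.get("user_needs_item_id")) and text_value(row.get("user_needs_item_id")) == text_value(live_item.get("userNeedsItemId")):
--         score += 200
--     if text_value(row.get("product_id")) and text_value(row.get("product_id")) == text_value(live_item.get("productId")):
--         score += 160
--     if text_value(row.get("quoted_price_item_id")) and text_value(row.get("quoted_price_item_id")) == text_value(live_item.get("quotedPriceItemId")):
--         score += 120
--     if text_value(row.get("resolve_result_id")) and text_value(row.get("resolve_result_id")) == text_value(live_item.get("resolveResultId")):
--         score += 60
--     if text_value(row.get("brand_id")) and text_value(row.get("brand_id")) == text_value(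
--         first_present_value(live_item.get("partsBrandId"), live_item.get("brandId"))
--     ):
--         score += 20
--     if text_value(row.get("parts_brand_quality")) and text_value(row.get("parts_brand_quality")) == text_value(live_item.get("partsBrandQuality")):
--         score += 18
--     if normalize_match_key(row.get("old_parts_num")) and normalize_match_key(row.get("old_parts_num")) == normalize_match_key(live_item.get("oldPartsNum")):
--         score += 12
--     if normalize_match_key(row.get("parts_num")) and normalize_match_key(row.get("parts_num")) == normalize_match_key(live_item.get("partsNum")):
--         score += 10
--     if text_value(row.get("part_type")) and text_value(row.get("part_type")) == text_value(live_item.get("partType")):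
--         score += 6
--     return score
--
-- def pick_live_item(
--     row: Dict[str, Any],
--     live_items: Sequence[Dict[str, Any]],
--     used_indices: set[int],
-- ) -> Tuple[Optional[int], Optional[Dict[str, Any]]]:
--     for allow_used in (False, True):
--         best_index: Optional[int] = None
--         best_score = 0
--         for index, live_item in enumerate(live_items):
--             if not allow_used and index in used_indices:
--                 continue
--             score = score_live_item_match(row, live_item)
--             if score > best_score:
--                 best_index = index
--                 best_score = score
--         if best_index is not None and best_score > 0:
--             return best_index, live_items[best_index]
--     return None, None
-- ===== SOURCE B (Python) =====
-- from typing import Any, Dict, Optional, Sequence, Tuple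
--
-- def text_value(value: Any) -> str:
--     return "" if value is None else str(value).strip()
--
-- def first_present_value(*values: Any) -> Any:
--     for value in values:
--         if value is None:
--             continue
--         if isinstance(value, str) and not value.strip():
--             continue
--         return value
--     return None
--
-- def normalize_match_key(value: Any) -> str:
--     return "".join(ch for ch in text_value(value).upper() if ch.isalnum())
--
-- def score_live_item_match(row: Dict[str, Any], live_item: Dict[str, Any]) -> int:
--     score = 0
--     if text_value(row.get("user_needs_item_id")) and text_value(row.get("user_needs_item_id")) == text_value(live_item.get("userNeedsItemId")):
--         score += 200
--     if text_value(row.get("product_id")) and text_value(row.get("product_id")) == text_value(live_item.get("productId")):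
--         score += 160
--     if text_value(row.get("quoted_price_item_id")) and text_value(row.get("quoted_price_item_id")) == text_value(live_item.get("quotedPriceItemId")):
--         score += 120
--     if text_value(row.get("resolve_result_id")) and text_value(row.get("resolve_result_id")) == text_value(live_item.get("resolveResultId")):
--         score += 60
--     if text_value(row.get("brand_id")) and text_value(row.get("brand_id")) == text_value(
--         first_present_value(live_item.get("partsBrandId"), live_item.get("brandId"))
--     ):
--         score += 20
--     if text_value(row.get("parts_brand_quality")) and text_value(row.get("parts_brand_quality")) == text_value(live_item.get("partsBrandQuality")):
--         score += 18
--     if normalize_match_key(row.get("old_parts_num")) and normalize_match_key(row.get("old_parts_num")) == normalize_match_key(live_item.get("oldPartsNum")):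
--         score += 12
--     if normalize_match_key(row.get("parts_num")) and normalize_match_key(row.get("parts_num")) == normalize_match_key(live_item.get("partsNum")):
--         score += 10
--     if text_value(row.get("part_type")) and text_value(row.get("part_type")) == text_value(live_item.get("partType")):
--         score += 6
--     return score
--
-- def pick_live_item(
--     row: Dict[str, Any],
--     live_items: Sequence[Dict[str, Any]],
--     used_indices: "set[int]",
-- ) -> Tuple[Optional[int], Optional[Dict[str, Any]]]:
--     # Single pass: score each item once, keep two first-max trackers.
--     best_unused_index: Optional[int] = None
--     best_unused_score = 0
--     best_overall_index: Optional[int] = None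
--     best_overall_score = 0
--     for index, live_item in enumerate(live_items):
--         score = score_live_item_match(row, live_item)
--         if score > best_overall_score:
--             best_overall_index = index
--             best_overall_score = score
--         if index not in used_indices and score > best_unused_score:
--             best_unused_index = index
--             best_unused_score = score
--     if best_unused_score > 0:
--         return best_unused_index, live_items[best_unused_index]
--     if best_overall_score > 0:
--         return best_overall_index, live_items[best_overall_index]
--     return None, None
-- ===== Notes on version B (the rewrite author's own statement) =====
-- stated objective: alternative
-- what changed: Replaces A's two sequential passes over live_items (unused-only, then all) with a single left-to-right pass that scores each item exactly once while maintaining two strict-'>' first-max trackers (best unused and best overall), then returns best-unused if positive, else best-overall if positive, else (None, None).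
import Mathlib
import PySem

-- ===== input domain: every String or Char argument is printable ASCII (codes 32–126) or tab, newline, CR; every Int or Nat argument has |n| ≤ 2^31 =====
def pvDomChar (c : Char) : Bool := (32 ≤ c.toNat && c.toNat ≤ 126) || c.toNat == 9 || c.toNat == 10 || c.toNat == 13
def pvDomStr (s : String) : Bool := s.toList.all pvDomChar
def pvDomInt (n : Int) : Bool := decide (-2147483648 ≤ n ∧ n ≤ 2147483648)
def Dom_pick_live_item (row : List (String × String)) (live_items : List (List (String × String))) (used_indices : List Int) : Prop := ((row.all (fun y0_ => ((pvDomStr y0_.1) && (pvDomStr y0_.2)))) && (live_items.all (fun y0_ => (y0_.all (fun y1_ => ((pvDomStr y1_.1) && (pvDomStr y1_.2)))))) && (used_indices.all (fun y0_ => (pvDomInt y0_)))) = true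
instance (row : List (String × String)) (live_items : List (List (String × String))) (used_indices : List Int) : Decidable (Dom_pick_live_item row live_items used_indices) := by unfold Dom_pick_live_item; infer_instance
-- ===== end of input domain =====

-- B replaces A's two sequential scoring passes with ONE pass keeping two first-max trackers
-- (best unused / best overall); objective: alternative decomposition, same results.
-- Scoring helpers (module-level in the Python source, shared verbatim by A and B):

-- text_value(v) for an Optional[str]
def pvTv (o : Option String) : String :=
  match o with
  | none => ""
  | some s => PySem.Str.strip s

-- first_present_value(*values) over Optional[str] arguments
def pvFpv : List (Option String) → Option String
  | [] => none
  | none :: rest => pvFpv rest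
  | some s :: rest => if PySem.Str.strip s = "" then pvFpv rest else some s

-- normalize_match_key(v): uppercase then keep alnum chars (as a List Char)
def pvNmk (o : Option String) : List Char :=
  (PySem.Chars.upper (pvTv o).toList).filter PySem.Chars.isalnum

-- score_live_item_match(row, live_item)
def pvScore (row item : List (String × String)) : Int :=
  let s : Int := 0
  let s := if pvTv (row.lookup "user_needs_item_id") ≠ "" ∧ pvTv (row.lookup "user_needs_item_id") = pvTv (item.lookup "userNeedsItemId") then s + 200 else s
  let s := if pvTv (row.lookup "product_id") ≠ "" ∧ pvTv (row.lookup "product_id") = pvTv (item.lookup "productId") then s + 160 else s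
  let s := if pvTv (row.lookup "quoted_price_item_id") ≠ "" ∧ pvTv (row.lookup "quoted_price_item_id") = pvTv (item.lookup "quotedPriceItemId") then s + 120 else s
  let s := if pvTv (row.lookup "resolve_result_id") ≠ "" ∧ pvTv (row.lookup "resolve_result_id") = pvTv (item.lookup "resolveResultId") then s + 60 else s
  let s := if pvTv (row.lookup "brand_id") ≠ "" ∧ pvTv (row.lookup "brand_id") = pvTv (pvFpv [item.lookup "partsBrandId", item.lookup "brandId"]) then s + 20 else s
  let s := if pvTv (row.lookup "parts_brand_quality") ≠ "" ∧ pvTv (row.lookup "parts_brand_quality") = pvTv (item.lookup "partsBrandQuality") then s + 18 else s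
  let s := if pvNmk (row.lookup "old_parts_num") ≠ [] ∧ pvNmk (row.lookup "old_parts_num") = pvNmk (item.lookup "oldPartsNum") then s + 12 else s
  let s := if pvNmk (row.lookup "parts_num") ≠ [] ∧ pvNmk (row.lookup "parts_num") = pvNmk (item.lookup "partsNum") then s + 10 else s
  let s := if pvTv (row.lookup "part_type") ≠ "" ∧ pvTv (row.lookup "part_type") = pvTv (item.lookup "partType") then s + 6 else s
  s

-- ===== PORT A =====
-- one body of A's inner 'for index, live_item in enumerate(live_items)' loop
def pvStepA (row : List (String × String)) (used : List Int) (allow_used : Bool)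
    (st : Option Int × Int) (p : Int × List (String × String)) : Option Int × Int :=
  if !allow_used && used.contains p.1 then st
  else
    let s := pvScore row p.2
    if s > st.2 then (some p.1, s) else st

-- the early 'return best_index, live_items[best_index]' (none = fall through to the next pass)
def pvRetA (live_items : List (List (String × String))) (r : Option Int × Int) :
    Option (Option Int × Option (List (String × String))) :=
  match r with
  | (some i, s) => if s > 0 then some (some i, PySem.List.pyGet? live_items i) else none
  | (none, _) => none

def pick_live_item (row : List (String × String)) (live_items : List (List (String × String))) (used_indices : List Int) : Option Int × (Option (List (String × String))) :=
  -- for allow_used in (False, True): scan, early-return on a positive best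
  match pvRetA live_items ((PySem.List.enumerate live_items).foldl (pvStepA row used_indices false) (none, 0)) with
  | some out => out
  | none =>
    match pvRetA live_items ((PySem.List.enumerate live_items).foldl (pvStepA row used_indices true) (none, 0)) with
    | some out => out
    | none => (none, none)

-- ===== PORT B =====
-- single-pass loop body: score once, update both trackers (best overall, then best unused)
def pvStepB (row : List (String × String)) (used : List Int)
    (st : (Option Int × Int) × (Option Int × Int)) (p : Int × List (String × String)) :
    (Option Int × Int) × (Option Int × Int) :=
  let s := pvScore row p.2
  let bo := if s > st.2.2 then (some p.1, s) else st.2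
  let bu := if used.contains p.1 then st.1 else if s > st.1.2 then (some p.1, s) else st.1
  (bu, bo)

def pick_live_item_alt (row : List (String × String)) (live_items : List (List (String × String))) (used_indices : List Int) : Option Int × (Option (List (String × String))) :=
  let st := (PySem.List.enumerate live_items).foldl (pvStepB row used_indices) ((none, 0), (none, 0))
  if st.1.2 > 0 then
    match st.1.1 with
    | some i => (some i, PySem.List.pyGet? live_items i)
    | none => (none, none)
  else if st.2.2 > 0 then
    match st.2.1 with
    | some i => (some i, PySem.List.pyGet? live_items i)
    | none => (none, none)
  else (none, none)

-- ===== PRECONDITION & SPEC =====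
def Spec_pick_live_item (row : List (String × String)) (live_items : List (List (String × String))) (used_indices : List Int) (out : Option Int × (Option (List (String × String)))) : Prop := out = pick_live_item_alt row live_items used_indices
instance (row : List (String × String)) (live_items : List (List (String × String))) (used_indices : List Int) (out : Option Int × (Option (List (String × String)))) : Decidable (Spec_pick_live_item row live_items used_indices out) := by unfold Spec_pick_live_item; infer_instance

-- ===== CLAIM (what is proved, stated in full; the proofs are below) =====
def Claim_equal_pick_live_item : Prop := ∀ (row : List (String × String)) (live_items : List (List (String × String))) (used_indices : List Int), Dom_pick_live_item row live_items used_indices → Spec_pick_live_item row live_items used_indices (pick_live_item row live_items used_indices)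

-- ===== LEMMAS AND PROOFS =====

-- B's combined fold is the pair of A's two pass folds
theorem pvFold_pair (row : List (String × String)) (used : List Int)
    (l : List (Int × List (String × String))) (u o : Option Int × Int) :
    l.foldl (pvStepB row used) (u, o) =
      (l.foldl (pvStepA row used false) u, l.foldl (pvStepA row used true) o) := by
  induction l generalizing u o with
  | nil => rfl
  | cons p l ih =>
    simp only [List.foldl_cons]
    rw [show pvStepB row used (u, o) p =
          (pvStepA row used false u p, pvStepA row used true o p) from ?_, ih]
    simp only [pvStepB, pvStepA, Bool.not_false, Bool.not_true, Bool.true_and, Bool.false_and,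
      Bool.false_eq_true, if_false]

-- a positive best score implies the best index is set
theorem pvFold_pos_isSome (row : List (String × String)) (used : List Int) (b : Bool)
    (l : List (Int × List (String × String))) (st : Option Int × Int)
    (h : 0 < st.2 → st.1.isSome) :
    0 < (l.foldl (pvStepA row used b) st).2 → (l.foldl (pvStepA row used b) st).1.isSome := by
  induction l generalizing st with
  | nil => exact h
  | cons p l ih =>
    simp only [List.foldl_cons]
    apply ih
    simp only [pvStepA]
    split_ifs <;> simp_all

-- ===== VERDICT (by name: the statement is the Claim_ definition above) =====
theorem pick_live_item_spec : Claim_equal_pick_live_item := by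
  intro row live_items used _
  show pick_live_item row live_items used = pick_live_item_alt row live_items used
  unfold pick_live_item pick_live_item_alt
  rw [pvFold_pair]
  have hu := pvFold_pos_isSome row used false (PySem.List.enumerate live_items) (none, 0) (by simp)
  have ho := pvFold_pos_isSome row used true (PySem.List.enumerate live_items) (none, 0) (by simp)
  set rU := (PySem.List.enumerate live_items).foldl (pvStepA row used false) (none, 0) with hrU
  set rO := (PySem.List.enumerate live_items).foldl (pvStepA row used true) (none, 0) with hrO
  obtain ⟨ui, us⟩ := rU
  obtain ⟨oi, os⟩ := rO
  cases ui with
  | some i =>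
    by_cases hus : us > 0
    · simp [pvRetA, hus]
    · cases oi with
      | some j => by_cases hos : os > 0 <;> simp [pvRetA, hus, hos]
      | none =>
        have hos : ¬ os > 0 := fun hp => by simpa using ho hp
        simp [pvRetA, hus, hos]
  | none =>
    have hus : ¬ us > 0 := fun hp => by simpa using hu hp
    cases oi with
    | some j => by_cases hos : os > 0 <;> simp [pvRetA, hus, hos]
    | none =>
      have hos : ¬ os > 0 := fun hp => by simpa using ho hp
      simp [pvRetA, hus, hos]
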